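-- pv_equiv track=rewrite | github.com/mzezin/AILearning | 006-Python/Lesson05/Seminar05/Task02.py | nextmax
-- ===== SOURCE A (Python) =====
-- def nextmax(listt):
--     max = listt[0]
--     res = [listt[0]]
--     for i in range(len(listt)):
--         if listt[i] > max:
--             max = listt[i]
--             res.append(max)
--     if len(res) == 1:
--         res = nextmax(listt[1:])
--     return res
-- ===== SOURCE B (Python) =====
-- def nextmax(listt):
--     # O(n): one right-to-left pass finds the max and the length of the first
--     # suffix whose head has a strictly greater element after it; then one
--     # left-to-right pass collects the running strict maxima of that suffix.
--     suf_max = listt[-1]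
--     keep = 1            # length of the suffix to take records from
--     seen = 1            # length of the suffix scanned so far
--     for x in reversed(listt[:-1]):
--         seen += 1
--         if x < suf_max:
--             keep = seen
--         else:
--             suf_max = x
--     res = []
--     for x in listt[len(listt) - keep:]:
--         if not res or x > res[-1]:
--             res.append(x)
--     return res
-- ===== Notes on version B (the rewrite author's own statement) =====
-- stated objective: alternative
-- what changed: A retries the running-maxima scan from each successive tail until one ascends (recursion with slicing, quadratic in the worst case); B instead finds the start of the answer suffix with a single right-to-left suffix-maximum pass and then collects the running strict maxima in one left-to-right pass.
import Mathlib
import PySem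

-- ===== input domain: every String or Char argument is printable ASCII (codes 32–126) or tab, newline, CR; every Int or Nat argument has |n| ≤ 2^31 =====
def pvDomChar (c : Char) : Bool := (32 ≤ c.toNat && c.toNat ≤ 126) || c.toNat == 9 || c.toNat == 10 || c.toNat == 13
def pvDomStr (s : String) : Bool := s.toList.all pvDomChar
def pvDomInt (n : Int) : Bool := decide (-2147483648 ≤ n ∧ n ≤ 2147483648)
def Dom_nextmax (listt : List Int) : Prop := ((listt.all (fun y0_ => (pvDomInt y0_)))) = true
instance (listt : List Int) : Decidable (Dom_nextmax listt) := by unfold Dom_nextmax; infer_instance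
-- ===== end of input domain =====

-- B replaces A's "retry from the next tail" recursion by one right-to-left suffix-max pass
-- locating the start of the answer suffix plus one running-maxima pass (alternative algorithm).


-- ===== PORT A =====
-- body of A's for-loop: 'if listt[i] > max: max = listt[i]; res.append(max)'
def nextmaxLoop (st : Int × List Int) (v : Int) : Int × List Int :=
  if v > st.1 then (v, st.2 ++ [v]) else st

def nextmax : List Int → List Int
  | [] => []          -- Python: listt[0] raises IndexError here (outside Pre_)
  | x :: xs =>
    let res := ((PySem.List.pyRange 0 ((x :: xs).length) 1).foldl
      (fun st i => nextmaxLoop st (PySem.List.pyGetD (x :: xs) i 0)) (x, [x])).2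
    if res.length = 1 then nextmax xs else res   -- listt[1:] is xs

-- ===== PORT B =====
-- body of B's first loop: 'seen += 1; if x < suf_max: keep = seen else: suf_max = x'
-- state = (suf_max, keep, seen)
def bStep (st : Int × Int × Int) (x : Int) : Int × Int × Int :=
  if x < st.1 then (st.1, st.2.2 + 1, st.2.2 + 1) else (x, st.2.1, st.2.2 + 1)

-- body of B's second loop: 'if not res or x > res[-1]: res.append(x)'
def recStep (res : List Int) (x : Int) : List Int :=
  if res.isEmpty || decide (x > PySem.List.pyGetD res (-1) 0) then res ++ [x] else res

def nextmax_alt (listt : List Int) : List Int :=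
  match PySem.List.pyGet? listt (-1) with
  | none => []        -- Python: listt[-1] raises IndexError here (outside Pre_)
  | some lastv =>
    let st := ((PySem.List.slice listt none (some (-1))).reverse).foldl bStep (lastv, 1, 1)
    (PySem.List.slice listt (some ((listt.length : Int) - st.2.1)) none).foldl recStep []

-- ===== PRECONDITION & SPEC =====
-- Pre_ excludes exactly the inputs where A raises IndexError: non-increasing lists
-- (including [] and singletons), on which A's recursion reaches the empty list.
def Pre_nextmax (listt : List Int) : Prop := ¬ List.IsChain (fun a b => b ≤ a) listt
instance (listt : List Int) : Decidable (Pre_nextmax listt) := by unfold Pre_nextmax; infer_instance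
def pvWitness_nextmax : List Int := ([1, 2])
def Spec_nextmax (listt : List Int) (out : List Int) : Prop := out = nextmax_alt listt
instance (listt : List Int) (out : List Int) : Decidable (Spec_nextmax listt out) := by unfold Spec_nextmax; infer_instance

-- ===== CLAIM (what is proved, stated in full; the proofs are below) =====
def Claim_equal_nextmax : Prop := ∀ (listt : List Int), Dom_nextmax listt → Pre_nextmax listt → Spec_nextmax listt (nextmax listt)

-- ===== LEMMAS AND PROOFS =====

-- running strict maxima of a list, given current maximum m (shared reference function)
def recAux (m : Int) : List Int → List Int
  | [] => []
  | y :: ys => if m < y then y :: recAux y ys else recAux m ys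

-- the intended result: drop leading elements that dominate their suffix, then running maxima
def specF : List Int → List Int
  | [] => []
  | x :: xs => if xs.any (fun y => decide (x < y)) then x :: recAux x xs else specF xs

theorem foldA (xs : List Int) : ∀ (m : Int) (acc : List Int),
    xs.foldl nextmaxLoop (m, acc) = (xs.foldl max m, acc ++ recAux m xs) := by
  induction xs with
  | nil => simp [recAux]
  | cons y ys ih =>
    intro m acc
    by_cases h : m < y
    · simp [nextmaxLoop, recAux, h, ih, max_eq_right h.le]
    · simp [nextmaxLoop, recAux, h, not_lt.mp h, ih]

theorem recAux_eq_nil_iff (m : Int) (xs : List Int) :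
    recAux m xs = [] ↔ ∀ y ∈ xs, y ≤ m := by
  induction xs generalizing m with
  | nil => simp [recAux]
  | cons y ys ih =>
    by_cases h : m < y
    · simp [recAux, h]
    · simp [recAux, h, ih]
      intro _
      exact not_lt.mp h

theorem chainLe_cons_cons (x y : Int) (ys : List Int) :
    List.IsChain (fun a b => b ≤ a) (x :: y :: ys) ↔
      y ≤ x ∧ List.IsChain (fun a b => b ≤ a) (y :: ys) := by
  constructor
  · rintro (_ | _ | ⟨h, hc⟩); exact ⟨‹_›, ‹_›⟩
  · rintro ⟨h, hc⟩; exact .cons_cons h hc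

theorem A_eq_specF (l : List Int) (h : Pre_nextmax l) : nextmax l = specF l := by
  induction l with
  | nil => exact absurd List.isChain_nil h
  | cons x xs ih =>
    rw [nextmax]
    rw [PySem.List.foldl_pyRange_zero_pyGetD' (x :: xs) 0 nextmaxLoop (x, [x])]
    have h1 : (x :: xs).foldl nextmaxLoop (x, [x]) = (xs.foldl max x, [x] ++ recAux x xs) := by
      simp [List.foldl_cons, nextmaxLoop, foldA]
    rw [h1]
    by_cases hnil : recAux x xs = []
    · have hall : ∀ y ∈ xs, y ≤ x := (recAux_eq_nil_iff x xs).mp hnil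
      have hany : xs.any (fun y => decide (x < y)) = false := by
        simp only [List.any_eq_false, decide_eq_true_eq, not_lt]
        exact hall
      have hpre : Pre_nextmax xs := by
        cases xs with
        | nil => exact absurd (List.isChain_singleton x) h
        | cons y ys =>
          intro hc
          exact h ((chainLe_cons_cons x y ys).mpr ⟨hall y (by simp), hc⟩)
      simp [hnil, specF, hany, ih hpre]
    · have hany : xs.any (fun y => decide (x < y)) = true := by
        by_contra hf
        apply hnil
        apply (recAux_eq_nil_iff x xs).mpr
        intro y hy
        by_contra hy2
        exact hf (List.any_eq_true.mpr ⟨y, hy, by simpa using not_le.mp hy2⟩)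
      have hlen : ([x] ++ recAux x xs).length ≠ 1 := by
        simp
        omega
      show (if ([x] ++ recAux x xs).length = 1 then nextmax xs
        else [x] ++ recAux x xs) = specF (x :: xs)
      rw [if_neg hlen]
      simp [specF, hany]

def bState (l : List Int) : Int × Int × Int :=
  l.dropLast.reverse.foldl bStep (l.getLast?.getD 0, 1, 1)

theorem foldRec (xs : List Int) : ∀ (acc : List Int) (m : Int), acc.getLast? = some m →
    xs.foldl recStep acc = acc ++ recAux m xs := by
  induction xs with
  | nil => intro acc m _; simp [recAux]
  | cons y ys ih =>
    intro acc m hm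
    have hne : acc ≠ [] := by rintro rfl; simp at hm
    have hgl : acc.getLast hne = m := by
      rw [List.getLast?_eq_some_getLast hne] at hm
      exact Option.some_inj.mp hm
    have hget : PySem.List.pyGetD acc (-1) 0 = m := by
      rw [PySem.List.pyGetD_neg_one acc 0 hne, hgl]
    have hstep : recStep acc y = if m < y then acc ++ [y] else acc := by
      simp [recStep, hne, hget]
    by_cases hy : m < y
    · rw [List.foldl_cons, hstep, if_pos hy,
        ih (acc ++ [y]) y (by simp), recAux, if_pos hy]
      simp
    · rw [List.foldl_cons, hstep, if_neg hy, ih acc m hm, recAux, if_neg hy]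

theorem records_cons (x : Int) (xs : List Int) :
    (x :: xs).foldl recStep [] = x :: recAux x xs := by
  rw [List.foldl_cons, show recStep [] x = [x] by simp [recStep],
    foldRec xs [x] x (by simp)]
  simp

theorem bState_cons (x y : Int) (ys : List Int) :
    bState (x :: y :: ys) = bStep (bState (y :: ys)) x := by
  simp [bState, List.dropLast_cons₂, List.reverse_cons, List.foldl_append,
    List.getLast?_cons_cons]

theorem bState_singleton (x : Int) : bState [x] = (x, 1, 1) := by
  simp [bState]

theorem bState_inv (l : List Int) (hne : l ≠ []) :
    (bState l).2.2 = l.length ∧ (bState l).1 ∈ l ∧ (∀ y ∈ l, y ≤ (bState l).1) ∧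
    1 ≤ (bState l).2.1 ∧ (bState l).2.1 ≤ (l.length : Int) ∧
    (Pre_nextmax l → (l.drop (((l.length : Int) - (bState l).2.1).toNat)).foldl recStep [] = specF l) := by
  induction l with
  | nil => exact absurd rfl hne
  | cons x xs ih =>
    cases xs with
    | nil =>
      refine ⟨by simp [bState_singleton], by simp [bState_singleton],
        by simp [bState_singleton], by simp [bState_singleton],
        by simp [bState_singleton], ?_⟩
      intro hpre
      exact absurd (List.isChain_singleton x) hpre
    | cons y ys =>
      obtain ⟨hs, hmem, hmax, hk1, hkle, hspec⟩ := ih (by simp)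
      rw [bState_cons]
      set m := (bState (y :: ys)).1 with hm
      set k := (bState (y :: ys)).2.1 with hk
      set s := (bState (y :: ys)).2.2 with hsdef
      have hstep : bStep (bState (y :: ys)) x =
          if x < m then (m, s + 1, s + 1) else (x, k, s + 1) := by
        simp [bStep, hm, hk, hsdef]
      by_cases hx : x < m
      · rw [hstep, if_pos hx]
        refine ⟨by simp [hs], List.mem_cons_of_mem _ hmem, ?_, by simp [hs]; omega, ?_, ?_⟩
        · intro z hz
          rcases List.mem_cons.mp hz with rfl | hz'
          · exact hx.le
          · exact hmax z hz'
        · simp [hs]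
        · intro _
          have hz : (((((x :: y :: ys).length : Int)) - (s + 1)).toNat) = 0 := by
            simp [hs]
          rw [hz, List.drop_zero, records_cons]
          have hany : (y :: ys).any (fun z => decide (x < z)) = true :=
            List.any_eq_true.mpr ⟨m, hmem, by simpa using hx⟩
          simp [specF, hany]
      · rw [hstep, if_neg hx]
        have hmx : m ≤ x := not_lt.mp hx
        refine ⟨by simp [hs], by simp, ?_, hk1, ?_, ?_⟩
        · intro z hz
          rcases List.mem_cons.mp hz with rfl | hz'
          · exact le_refl z
          · exact le_trans (hmax z hz') hmx
        · simp at hkle ⊢; omega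
        · intro hpre
          have hyx : y ≤ x := le_trans (hmax y (by simp)) hmx
          have hpre' : Pre_nextmax (y :: ys) := fun hc =>
            hpre ((chainLe_cons_cons x y ys).mpr ⟨hyx, hc⟩)
          have hany : (y :: ys).any (fun z => decide (x < z)) = false := by
            simp only [List.any_eq_false, decide_eq_true_eq, not_lt]
            intro z hz
            exact le_trans (hmax z hz) hmx
          have hdrop : ((((x :: y :: ys).length : Int)) - k).toNat
              = ((((y :: ys).length : Int)) - k).toNat + 1 := by
            simp at hkle ⊢; omega
          rw [hdrop, List.drop_succ_cons, hspec hpre']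
          simp [specF, hany]

theorem B_eq_specF (l : List Int) (h : Pre_nextmax l) : nextmax_alt l = specF l := by
  cases l with
  | nil => exact absurd List.isChain_nil h
  | cons x xs =>
    obtain ⟨_, _, _, hk1, hkle, hspec⟩ := bState_inv (x :: xs) (by simp)
    have hlast : PySem.List.pyGet? (x :: xs) (-1)
        = some ((x :: xs).getLast (by simp)) := by
      rw [PySem.List.pyGet?_neg_one, List.getLast?_eq_some_getLast (by simp)]
    unfold nextmax_alt
    rw [hlast]
    have hst : ((PySem.List.slice (x :: xs) none (some (-1))).reverse).foldl bStep
        ((x :: xs).getLast (by simp), 1, 1) = bState (x :: xs) := by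
      rw [PySem.List.slice_to_neg_one, bState, List.getLast?_eq_some_getLast (by simp)]
      simp
    simp only [hst]
    rw [PySem.List.slice_from _ (by omega), hspec h]

-- ===== VERDICT (by name: the statement is the Claim_ definition above) =====
theorem nextmax_spec : Claim_equal_nextmax := by
  intro l _ hpre
  unfold Spec_nextmax
  rw [A_eq_specF l hpre, B_eq_specF l hpre]
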